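-- pv_equiv track=rewrite | github.com/sesacpython/sesacpython | week2_SH/035.배열 만들기 4.py | solution
-- ===== SOURCE A (Python) =====
-- def solution(arr):
--     i=0
--     stk=[]
--     while len(arr)>i:
--         if len(stk)==0:
--             stk.append(arr[i])
--             i += 1
--         elif len(stk)!=0 and stk[len(stk)-1]< arr[i]:
--             stk.append(arr[i])
--             i += 1
--         else:
--             stk.pop(len(stk)-1)
--     return stk
-- ===== SOURCE B (Python) =====
-- def solution(arr):
--     res = []
--     for x in reversed(arr):
--         if not res or x < res[-1]:
--             res.append(x)
--     res.reverse()
--     return res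
-- ===== Notes on version B (the rewrite author's own statement) =====
-- stated objective: simpler
-- what changed: Replaced A's index-driven stack loop (push, or pop repeatedly without advancing i) by a single right-to-left pass that keeps an element exactly when it is below the running minimum of the elements after it, then reverses the result.
import Mathlib
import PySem

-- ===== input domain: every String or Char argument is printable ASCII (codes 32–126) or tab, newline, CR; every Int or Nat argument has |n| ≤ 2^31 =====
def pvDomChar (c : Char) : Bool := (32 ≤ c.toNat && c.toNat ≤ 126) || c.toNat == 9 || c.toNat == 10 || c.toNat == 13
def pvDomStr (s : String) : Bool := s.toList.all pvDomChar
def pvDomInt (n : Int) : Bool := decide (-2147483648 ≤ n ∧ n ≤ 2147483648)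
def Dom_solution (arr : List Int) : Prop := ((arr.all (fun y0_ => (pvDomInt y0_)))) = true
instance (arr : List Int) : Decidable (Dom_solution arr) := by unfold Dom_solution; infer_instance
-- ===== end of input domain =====

-- B replaces A's index-driven stack loop (push / pop-inner-loop) by a single
-- right-to-left pass keeping a running minimum; objective: simpler.

-- ===== PORT A =====
-- while len(arr)>i: push when stack empty or top < arr[i] (advancing i), else pop the top.
def loopA (arr : List Int) (i : Nat) (stk : List Int) : List Int :=
  if h : i < arr.length then
    if stk.length = 0 then
      loopA arr (i + 1) (stk ++ [arr[i]])
    else if stk.length ≠ 0 ∧ stk.getLast! < arr[i] then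
      loopA arr (i + 1) (stk ++ [arr[i]])
    else
      loopA arr i stk.dropLast
  else stk
termination_by 2 * (arr.length - i) + stk.length
decreasing_by
  · simp; omega
  · simp; omega
  · have : stk.dropLast.length = stk.length - 1 := by simp
    omega

def solution (arr : List Int) : List Int := loopA arr 0 []

-- ===== PORT B =====
-- for x in reversed(arr): append x when res empty or x < res[-1]; then reverse.
def solution_alt (arr : List Int) : List Int :=
  let res := arr.reverse.foldl
    (fun res x => if res = [] ∨ x < res.getLast! then res ++ [x] else res) []
  res.reverse

-- ===== PRECONDITION & SPEC =====
def Spec_solution (arr : List Int) (out : List Int) : Prop := out = solution_alt arr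
instance (arr : List Int) (out : List Int) : Decidable (Spec_solution arr out) := by unfold Spec_solution; infer_instance

-- ===== CLAIM (what is proved, stated in full; the proofs are below) =====
def Claim_equal_solution : Prop := ∀ (arr : List Int), Dom_solution arr → Spec_solution arr (solution arr)

-- ===== LEMMAS AND PROOFS =====

-- Stack held top-at-head (reversed) version of A's loop, consuming the suffix.
def gR : List Int → List Int → List Int
  | rstk, [] => rstk
  | rstk, x :: rest =>
    match rstk with
    | [] => gR [x] rest
    | a :: t => if a < x then gR (x :: a :: t) rest else gR t (x :: rest)
termination_by rstk s => 2 * s.length + rstk.length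

-- pop from the (reversed) stack while the top is ≥ y
def trimR : List Int → Int → List Int
  | [], _ => []
  | a :: t, y => if a < y then a :: t else trimR t y

-- the strict suffix-minima of a list, in order
def sm : List Int → List Int
  | [] => []
  | x :: xs =>
    match sm xs with
    | [] => [x]
    | y :: m => if x < y then x :: y :: m else y :: m

theorem gR_nil_cons (x : Int) (rest : List Int) : gR [] (x :: rest) = gR [x] rest := by
  rw [gR]

theorem gR_cons_lt {a x : Int} (t rest : List Int) (h : a < x) :
    gR (a :: t) (x :: rest) = gR (x :: a :: t) rest := by
  rw [gR]; simp [h]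

theorem gR_cons_ge {a x : Int} (t rest : List Int) (h : ¬ a < x) :
    gR (a :: t) (x :: rest) = gR t (x :: rest) := by
  rw [gR]; simp [h]

theorem trimR_trimR (r : List Int) (x y : Int) (h : y ≤ x) :
    trimR (trimR r x) y = trimR r y := by
  induction r with
  | nil => rfl
  | cons a t ih =>
    by_cases hax : a < x
    · simp [trimR, hax]
    · have hay : ¬ a < y := by omega
      simp [trimR, hax, hay, ih]

theorem gR_step (rstk : List Int) (x : Int) (rest : List Int) :
    gR rstk (x :: rest) = gR (x :: trimR rstk x) rest := by
  induction rstk with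
  | nil => simp [gR, trimR]
  | cons a t ih =>
    by_cases hax : a < x
    · simp [gR, trimR, hax]
    · simp [gR, trimR, hax, ih]

theorem gR_sm (s : List Int) : ∀ rstk : List Int,
    gR rstk s = (sm s).reverse ++ (match sm s with | [] => rstk | y :: _ => trimR rstk y) := by
  induction s with
  | nil => intro rstk; simp [gR, sm]
  | cons x rest ih =>
    intro rstk
    rw [gR_step, ih]
    cases hr : sm rest with
    | nil => simp [sm, hr]
    | cons y m =>
      by_cases hxy : x < y
      · have hyx : ¬ y ≤ x := by omega
        simp [sm, hr, hxy, trimR]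
      · have hyx : y ≤ x := by omega
        simp [sm, hr, hxy, trimR, trimR_trimR _ _ _ hyx]

theorem loopA_gR (arr : List Int) (i : Nat) (stk : List Int) :
    loopA arr i stk = (gR stk.reverse (arr.drop i)).reverse := by
  fun_induction loopA arr i stk with
  | case1 i stk h hemp ih =>
    have h0 : stk = [] := List.length_eq_zero_iff.mp hemp
    subst h0
    rw [ih]
    simp only [List.nil_append, List.reverse_nil, List.reverse_cons]
    rw [List.drop_eq_getElem_cons h, gR_nil_cons]
  | case2 i stk h hemp hlt ih =>
    rw [ih]
    obtain ⟨hne, hl⟩ := hlt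
    cases hr : stk.reverse with
    | nil => exact absurd (by simpa using congrArg List.length hr) hne
    | cons a t =>
      have hstk : stk = t.reverse ++ [a] := by
        have := congrArg List.reverse hr; simpa using this
      have ha : stk.getLast! = a := by subst hstk; simp
      rw [ha] at hl
      have h2 : (stk ++ [arr[i]]).reverse = arr[i] :: a :: t := by
        simp [List.reverse_append, hr]
      rw [h2, List.drop_eq_getElem_cons h, gR_cons_lt _ _ hl]
  | case3 i stk h hemp hlt ih =>
    rw [ih]
    have hne : stk.length ≠ 0 := by simpa using hemp
    cases hr : stk.reverse with
    | nil => exact absurd (by simpa using congrArg List.length hr) hne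
    | cons a t =>
      have hstk : stk = t.reverse ++ [a] := by
        have := congrArg List.reverse hr; simpa using this
      have ha : stk.getLast! = a := by subst hstk; simp
      have hax : ¬ a < arr[i] := by
        rw [← ha]; intro hc; exact hlt ⟨hne, hc⟩
      have hd : stk.dropLast.reverse = t := by subst hstk; simp
      rw [hd, List.drop_eq_getElem_cons h, gR_cons_ge _ _ hax]
  | case4 i stk h =>
    rw [List.drop_eq_nil_of_le (by omega)]
    simp [gR]

theorem step_rev (r : List Int) (x : Int) :
    (if r = [] ∨ x < r.getLast! then r ++ [x] else r) =
      ((match r.reverse with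
        | [] => [x]
        | a :: t => if x < a then x :: a :: t else a :: t)).reverse := by
  cases hr : r.reverse with
  | nil =>
    have : r = [] := by simpa using congrArg List.reverse hr
    subst this; simp
  | cons a t =>
    have hstk : r = t.reverse ++ [a] := by
      have := congrArg List.reverse hr; simpa using this
    have ha : r.getLast! = a := by
      subst hstk; simp
    by_cases hx : x < a
    · simp [hstk, hx]
    · simp [hstk, hx]

-- B's fold, in the reversed (cons) world
def fB (r : List Int) (x : Int) : List Int :=
  match r with
  | [] => [x]
  | a :: t => if x < a then x :: a :: t else a :: t

theorem foldl_step_rev (l : List Int) : ∀ r : List Int,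
    l.foldl (fun res x => if res = [] ∨ x < res.getLast! then res ++ [x] else res) r
      = (l.foldl fB r.reverse).reverse := by
  induction l with
  | nil => intro r; simp
  | cons x t ih =>
    intro r
    simp only [List.foldl_cons]
    rw [ih, step_rev]
    simp [fB]

theorem foldl_fB_sm (arr : List Int) : arr.reverse.foldl fB [] = sm arr := by
  induction arr with
  | nil => rfl
  | cons x t ih =>
    rw [List.reverse_cons, List.foldl_append, ih]
    cases h : sm t <;> simp [fB, sm, h]

theorem alt_eq_sm (arr : List Int) : solution_alt arr = sm arr := by
  unfold solution_alt
  rw [foldl_step_rev, ← foldl_fB_sm arr]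
  simp

-- ===== VERDICT (by name: the statement is the Claim_ definition above) =====
theorem solution_spec : Claim_equal_solution := by
  intro arr _
  unfold Spec_solution solution
  rw [loopA_gR, alt_eq_sm]
  have := gR_sm arr ([] : List Int)
  simp only [List.reverse_nil, List.drop_zero] at *
  rw [this]
  cases h : sm arr <;> simp [trimR]
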